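-- pv_equiv track=rewrite | github.com/lhy-hoyin/wordle-solver | wordleAlgo.py | getLettersNotInAnswer
-- ===== SOURCE A (Python) =====
-- def getLettersNotInAnswer(guessedWord, index):
--     notInAnswer = ""
--     inAnswer = ""
--     count = 0;
--     for num in index:
--         if num == '0':
--             if count < len(guessedWord):
--                 if inAnswer.__contains__(guessedWord[count]) == False:
--                     notInAnswer = notInAnswer + guessedWord[count]
--         else:
--             if count < len(guessedWord):
--                 inAnswer = inAnswer + guessedWord[count]
--         count += 1
--
--     for letter in notInAnswer:
--         if inAnswer.__contains__(letter):
--             notInAnswer = notInAnswer.replace(letter, "")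
--
--     return notInAnswer
-- ===== SOURCE B (Python) =====
-- def getLettersNotInAnswer(guessedWord, index):
--     pairs = list(zip(index, guessedWord))
--     inAnswer = {g for ix, g in pairs if ix != '0'}
--     return ''.join(g for ix, g in pairs if ix == '0' and g not in inAnswer)
-- ===== Notes on version B (the rewrite author's own statement) =====
-- stated objective: simpler
-- what changed: Replaces A's count-indexed loop with a partial in-pass duplicate check plus a second replace-removal pass by one zip, a precomputed set of in-answer letters, and a single filtering join.
import Mathlib
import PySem

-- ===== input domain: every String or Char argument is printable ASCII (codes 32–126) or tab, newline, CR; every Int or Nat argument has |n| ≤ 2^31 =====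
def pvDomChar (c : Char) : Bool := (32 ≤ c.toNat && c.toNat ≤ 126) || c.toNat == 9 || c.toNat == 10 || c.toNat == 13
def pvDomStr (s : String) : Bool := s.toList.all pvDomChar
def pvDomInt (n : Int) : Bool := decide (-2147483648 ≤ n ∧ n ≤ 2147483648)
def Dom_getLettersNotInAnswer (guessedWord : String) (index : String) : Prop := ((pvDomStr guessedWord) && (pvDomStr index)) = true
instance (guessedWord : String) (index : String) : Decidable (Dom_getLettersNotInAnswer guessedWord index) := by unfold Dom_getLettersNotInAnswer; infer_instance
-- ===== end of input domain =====

-- B replaces A's count-indexed loop (partial in-pass duplicate check + a second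
-- .replace removal pass) by one zip, a precomputed set of in-answer letters and a
-- single filtering pass; objective: simpler.


-- ===== PORT A =====
-- first loop: 'for num in index', carrying count, notInAnswer, inAnswer
def pvLoopA1 (gw : List Char) : List Char → Nat → List Char → List Char → List Char × List Char
  | [], _, nia, ia => (nia, ia)
  | num :: rest, c, nia, ia =>
    if num = '0' then
      if c < gw.length then
        if (ia.contains (gw.getD c ' ')) = false then
          pvLoopA1 gw rest (c + 1) (nia ++ [gw.getD c ' ']) ia
        else pvLoopA1 gw rest (c + 1) nia ia
      else pvLoopA1 gw rest (c + 1) nia ia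
    else
      if c < gw.length then pvLoopA1 gw rest (c + 1) nia (ia ++ [gw.getD c ' '])
      else pvLoopA1 gw rest (c + 1) nia ia

-- second loop: 'for letter in notInAnswer' (iterates the ORIGINAL string snapshot).
-- 'notInAnswer.replace(letter, "")' with a one-char pattern and empty replacement is
-- exactly 'remove every occurrence of letter', i.e. List.filter (· ≠ letter).
def pvLoopA2 (ia : List Char) : List Char → List Char → List Char
  | [], cur => cur
  | l :: rest, cur =>
    pvLoopA2 ia rest (if ia.contains l then cur.filter (fun c => !(c == l)) else cur)

def getLettersNotInAnswer (guessedWord : String) (index : String) : String :=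
  let gw := guessedWord.toList
  let st := pvLoopA1 gw index.toList 0 [] []
  String.ofList (pvLoopA2 st.2 st.1 st.1)

-- ===== PORT B =====
def getLettersNotInAnswer_alt (guessedWord : String) (index : String) : String :=
  let pairs := index.toList.zip guessedWord.toList
  let inAnswer : PySem.Set Char :=
    PySem.Set.ofList ((pairs.filter (fun p => !(p.1 == '0'))).map Prod.snd)
  String.ofList ((pairs.filter (fun p => p.1 == '0' && !(PySem.Set.contains inAnswer p.2))).map Prod.snd)

-- ===== PRECONDITION & SPEC =====
def Spec_getLettersNotInAnswer (guessedWord : String) (index : String) (out : String) : Prop := out = getLettersNotInAnswer_alt guessedWord index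
instance (guessedWord : String) (index : String) (out : String) : Decidable (Spec_getLettersNotInAnswer guessedWord index out) := by unfold Spec_getLettersNotInAnswer; infer_instance

-- ===== CLAIM (what is proved, stated in full; the proofs are below) =====
def Claim_equal_getLettersNotInAnswer : Prop := ∀ (guessedWord : String) (index : String), Dom_getLettersNotInAnswer guessedWord index → Spec_getLettersNotInAnswer guessedWord index (getLettersNotInAnswer guessedWord index)

-- ===== LEMMAS AND PROOFS =====

-- canonical form of A's first loop: a fold over the zipped pairs
def pvZf : List (Char × Char) → List Char → List Char → List Char × List Char
  | [], nia, ia => (nia, ia)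
  | p :: rest, nia, ia =>
    if p.1 = '0' then
      if (ia.contains p.2) = false then pvZf rest (nia ++ [p.2]) ia
      else pvZf rest nia ia
    else pvZf rest nia (ia ++ [p.2])

theorem pvLoopA1_eq_zf (idx : List Char) : ∀ (gw : List Char) (c : Nat) (nia ia : List Char),
    pvLoopA1 gw idx c nia ia = pvZf (idx.zip (gw.drop c)) nia ia := by
  induction idx with
  | nil => intro gw c nia ia; simp [pvLoopA1, pvZf]
  | cons num rest ih =>
    intro gw c nia ia
    by_cases h : c < gw.length
    · have hdrop : gw.drop c = gw[c] :: gw.drop (c + 1) := List.drop_eq_getElem_cons h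
      have hgetD : gw.getD c ' ' = gw[c] := List.getD_eq_getElem gw ' ' h
      rw [hdrop]
      simp only [pvLoopA1, pvZf, List.zip_cons_cons, hgetD]
      split_ifs <;> rw [ih]
    · have hd1 : gw.drop c = [] := List.drop_eq_nil_of_le (Nat.le_of_not_lt h)
      have hd2 : gw.drop (c + 1) = [] := List.drop_eq_nil_of_le (Nat.le_succ_of_le (Nat.le_of_not_lt h))
      rw [hd1]
      simp only [pvLoopA1, pvZf, List.zip_nil_right]
      split_ifs <;> rw [ih, hd2] <;> simp [pvZf]

theorem pvZf_snd (pairs : List (Char × Char)) : ∀ (nia ia : List Char),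
    (pvZf pairs nia ia).2 = ia ++ (pairs.filter (fun p => !(p.1 == '0'))).map Prod.snd := by
  induction pairs with
  | nil => intro nia ia; simp [pvZf]
  | cons p rest ih =>
    intro nia ia
    simp only [pvZf]
    split_ifs with h1 h2 <;> simp [ih, h1]

theorem pvLoopA2_eq_filter (ia : List Char) (s : List Char) : ∀ (cur : List Char),
    pvLoopA2 ia s cur = cur.filter (fun c => !(ia.contains c && s.contains c)) := by
  induction s with
  | nil => intro cur; simp [pvLoopA2]
  | cons l rest ih =>
    intro cur
    simp only [pvLoopA2]
    by_cases hl : ia.contains l = true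
    · rw [if_pos hl, ih, List.filter_filter]
      refine List.filter_congr ?_
      intro c _
      by_cases hc : c = l
      · subst hc; simp at hl; simp [hl]
      · simp [hc]
    · rw [if_neg hl, ih]
      refine List.filter_congr ?_
      intro c _
      by_cases hc : c = l
      · subst hc; simp at hl; simp [hl]
      · simp [hc]

-- the key invariant: filtering A's first-loop accumulator by the FULL in-answer list J
theorem pvZf_fst_filter (pairs : List (Char × Char)) : ∀ (nia ia J : List Char),
    (∀ c, ia.contains c = true → J.contains c = true) →
    (∀ p ∈ pairs, p.1 ≠ '0' → J.contains p.2 = true) →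
    ((pvZf pairs nia ia).1).filter (fun c => !(J.contains c)) =
      nia.filter (fun c => !(J.contains c)) ++
        (pairs.filter (fun p => p.1 == '0' && !(J.contains p.2))).map Prod.snd := by
  induction pairs with
  | nil => intro nia ia J _ _; simp [pvZf]
  | cons p rest ih =>
    intro nia ia J h1 h2
    simp only [pvZf]
    by_cases hn : p.1 = '0'
    · rw [if_pos hn]
      by_cases hc : ia.contains p.2 = true
      · rw [if_neg (by rw [hc]; simp)]
        have hJ : p.2 ∈ J := by simpa using h1 _ hc
        rw [ih nia ia J h1 (fun q hq => h2 q (List.mem_cons_of_mem _ hq))]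
        simp [hn, hJ]
      · rw [if_pos (by simpa using hc)]
        rw [ih (nia ++ [p.2]) ia J h1 (fun q hq => h2 q (List.mem_cons_of_mem _ hq))]
        rw [List.filter_append]
        by_cases hJ : p.2 ∈ J <;>
          simp [hn, hJ, List.append_assoc]
    · rw [if_neg hn]
      have hJp : J.contains p.2 = true := h2 p (List.mem_cons_self) hn
      have h1' : ∀ c, (ia ++ [p.2]).contains c = true → J.contains c = true := by
        intro c hc
        simp only [List.contains_append] at hc
        rcases Bool.or_eq_true_iff.mp hc with h | h
        · exact h1 c h
        · simp only [List.contains_cons, List.contains_nil, Bool.or_false, beq_iff_eq] at h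
          subst h; exact hJp
      rw [ih nia (ia ++ [p.2]) J h1' (fun q hq => h2 q (List.mem_cons_of_mem _ hq))]
      simp [hn]

theorem setContains_ofList (L : List Char) (c : Char) :
    PySem.Set.contains (PySem.Set.ofList L) c = L.contains c := by
  simp only [PySem.Set.contains_eq_listContains]
  rw [Bool.eq_iff_iff]
  simp [PySem.Set.mem_ofList]

-- ===== VERDICT (by name: the statement is the Claim_ definition above) =====
theorem getLettersNotInAnswer_spec : Claim_equal_getLettersNotInAnswer := by
  intro g i _
  show getLettersNotInAnswer g i = getLettersNotInAnswer_alt g i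
  unfold getLettersNotInAnswer getLettersNotInAnswer_alt
  simp only []
  set pairs := i.toList.zip g.toList with hpairs
  set J : List Char := (pairs.filter (fun p => !(p.1 == '0'))).map Prod.snd with hJ
  have hA1 : pvLoopA1 g.toList i.toList 0 [] [] = pvZf pairs [] [] := by
    rw [pvLoopA1_eq_zf]; simp [hpairs]
  rw [hA1]
  have hsnd : (pvZf pairs [] []).2 = J := by rw [pvZf_snd]; simp [hJ]
  have h2mem : ∀ p ∈ pairs, p.1 ≠ '0' → J.contains p.2 = true := by
    intro p hp hne
    rw [Bool.eq_iff_iff]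
    simp only [hJ, List.contains_iff_mem, List.mem_map, List.mem_filter]
    exact ⟨fun _ => trivial, fun _ => ⟨p, ⟨hp, by simp [hne]⟩, rfl⟩⟩
  have hfilter :
      pvLoopA2 (pvZf pairs [] []).2 (pvZf pairs [] []).1 (pvZf pairs [] []).1 =
        (pairs.filter (fun p => p.1 == '0' && !(J.contains p.2))).map Prod.snd := by
    rw [pvLoopA2_eq_filter, hsnd]
    have hstep : ((pvZf pairs [] []).1).filter
        (fun c => !(J.contains c && ((pvZf pairs [] []).1).contains c)) =
        ((pvZf pairs [] []).1).filter (fun c => !(J.contains c)) := by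
      refine List.filter_congr ?_
      intro c hc
      simp [hc]
    rw [hstep, pvZf_fst_filter pairs [] [] J (by simp) h2mem]
    simp
  rw [hfilter]
  congr 1
  refine congrArg _ (List.filter_congr ?_)
  intro p _
  rw [setContains_ofList]
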